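-- pv_equiv track=rewrite | github.com/wekesa/python_practise | algorithms/ms_codility_q1.py | solution
-- ===== SOURCE A (Python) =====
-- def solution(ranks):
--     """
--     - Algorithms/ Steps followed to solve this problem
--     1) Get the
--     2)
--     3)
--     4)
--     5)
--     6) Time Complexity O()
--     6) Space Complexity O()
--     :return:
--     """
--     map_of_ranks = {}
--     reporting_soldiers = 0
--
--     for rank in ranks:
--         if map_of_ranks.get(rank):
--             map_of_ranks[rank] = map_of_ranks[rank] + 1
--         else:
--             map_of_ranks[rank] = 1
--
--     for rank in map_of_ranks:
--         higher_rank = rank + 1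
--         if map_of_ranks.get(higher_rank):
--             reporting_soldiers += map_of_ranks[rank]
--     return reporting_soldiers
-- ===== SOURCE B (Python) =====
-- def solution(ranks):
--     total = 0
--     run = 0
--     prev = None
--     for x in sorted(ranks):
--         if prev is not None and x == prev:
--             run += 1
--         else:
--             if prev is not None and x == prev + 1:
--                 total += run
--             run = 1
--         prev = x
--     return total
-- ===== Notes on version B (the rewrite author's own statement) =====
-- stated objective: alternative
-- what changed: B uses no hash map at all: it sorts the list and makes one linear scan over the sorted order, tracking the current run length and the previous value, adding a finished run's length whenever the next value is exactly one higher.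
import Mathlib
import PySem

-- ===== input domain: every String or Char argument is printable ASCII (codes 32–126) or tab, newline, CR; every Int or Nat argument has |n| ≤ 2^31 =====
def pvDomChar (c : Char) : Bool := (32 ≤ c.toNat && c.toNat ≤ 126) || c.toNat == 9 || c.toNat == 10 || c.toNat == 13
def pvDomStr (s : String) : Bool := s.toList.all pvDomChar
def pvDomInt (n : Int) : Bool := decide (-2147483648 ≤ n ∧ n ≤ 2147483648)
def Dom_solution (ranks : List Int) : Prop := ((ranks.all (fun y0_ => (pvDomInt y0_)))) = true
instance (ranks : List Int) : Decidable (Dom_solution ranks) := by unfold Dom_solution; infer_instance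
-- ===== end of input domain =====

-- B drops A's rank->multiplicity dict entirely: it sorts the list and counts run
-- lengths in one linear scan over the sorted order (objective: alternative).


-- ===== PORT A =====
def solution (ranks : List Int) : Int :=
  let map_of_ranks : PySem.Dict Int Int :=
    ranks.foldl (fun d rank =>
      if (d.get? rank).getD 0 ≠ 0 then        -- 'if map_of_ranks.get(rank):' (None and 0 falsy)
        d.insert rank (d.getD rank 0 + 1)
      else
        d.insert rank 1) PySem.Dict.empty
  map_of_ranks.keys.foldl (fun reporting_soldiers rank =>
    if (map_of_ranks.get? (rank + 1)).getD 0 ≠ 0 then  -- 'if map_of_ranks.get(higher_rank):'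
      reporting_soldiers + map_of_ranks.getD rank 0
    else reporting_soldiers) 0

-- ===== PORT B =====
-- one step of Source B's loop body; state = (total, run, prev)
def bStep (st : Int × Int × Option Int) (x : Int) : Int × Int × Option Int :=
  match st with
  | (total, run, some p) =>
    if x = p then (total, run + 1, some x)
    else if x = p + 1 then (total + run, 1, some x)
    else (total, 1, some x)
  | (total, run, none) =>
    let _ := run
    (total, 1, some x)

def solution_alt (ranks : List Int) : Int :=
  ((PySem.List.sorted ranks (fun x => x) false).foldl bStep (0, 0, none)).1

-- ===== PRECONDITION & SPEC =====
def Spec_solution (ranks : List Int) (out : Int) : Prop := out = solution_alt ranks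
instance (ranks : List Int) (out : Int) : Decidable (Spec_solution ranks out) := by unfold Spec_solution; infer_instance

-- ===== CLAIM (what is proved, stated in full; the proofs are below) =====
def Claim_equal_solution : Prop := ∀ (ranks : List Int), Dom_solution ranks → Spec_solution ranks (solution ranks)

-- ===== LEMMAS AND PROOFS =====

-- A's build step is extensionally 'insert rank (getD rank 0 + 1)'.
theorem buildA_eq_counter (ranks : List Int) :
    ranks.foldl (fun d rank =>
      if (d.get? rank).getD 0 ≠ 0 then d.insert rank (d.getD rank 0 + 1)
      else d.insert rank 1) PySem.Dict.empty = PySem.Dict.counter ranks := by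
  rw [← PySem.Dict.foldl_insert_getD_add_one_eq_counter]
  congr 1
  funext d rank
  by_cases h : (d.get? rank).getD 0 = 0
  · simp [h, PySem.Dict.getD_eq_get?_getD]
  · simp [h]

-- Σ over a Nodup list containing x of (if u = x then c else 0) is c.
theorem sum_map_indicator {x : Int} (c : Int) :
    ∀ (s : List Int), s.Nodup → x ∈ s →
      (s.map (fun u => if u = x then c else 0)).sum = c := by
  intro s
  induction s with
  | nil => simp
  | cons a t ih =>
    intro hnd hmem
    rcases List.mem_cons.mp hmem with h | h
    · subst h
      have : (t.map (fun u => if u = x then c else 0)).sum = 0 := by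
        apply List.sum_eq_zero
        intro y hy
        rcases List.mem_map.mp hy with ⟨u, hu, rfl⟩
        have : u ≠ x := fun e => (List.nodup_cons.mp hnd).1 (e ▸ hu)
        simp [this]
      simp [this]
    · have hax : a ≠ x := fun e => (List.nodup_cons.mp hnd).1 (e ▸ h)
      simp [hax, ih (List.nodup_cons.mp hnd).2 h]

-- grouped sum of multiplicities = direct count over the list
theorem sum_counts_eq_countP (p : Int → Bool) :
    ∀ (l s : List Int), s.Nodup → (∀ x ∈ l, x ∈ s) →
      (s.map (fun u => if p u then (l.count u : Int) else 0)).sum = (l.countP p : Int) := by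
  intro l
  induction l with
  | nil => intro s _ _; simp
  | cons x t ih =>
    intro s hnd hsub
    have hx : x ∈ s := hsub x (List.mem_cons_self)
    have hsplit : ∀ u : Int,
        (if p u then (((x :: t).count u : Nat) : Int) else 0) =
        (if p u then (t.count u : Int) else 0) + (if u = x then (if p x then 1 else 0) else 0) := by
      intro u
      by_cases hux : u = x
      · subst hux; by_cases hp : p u <;> simp [hp, List.count_cons_self]
      · by_cases hp : p u <;> simp [hp, hux, Ne.symm hux]
    calc (s.map (fun u => if p u then ((x :: t).count u : Int) else 0)).sum
        = (s.map (fun u => (if p u then (t.count u : Int) else 0)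
            + (if u = x then (if p x then 1 else 0) else 0))).sum := by
          congr 1; exact List.map_congr_left (fun u _ => hsplit u)
      _ = (s.map (fun u => if p u then (t.count u : Int) else 0)).sum
            + (s.map (fun u => if u = x then (if p x then 1 else 0) else 0)).sum := by
          rw [← List.sum_map_add]
      _ = (t.countP p : Int) + (if p x then 1 else 0) := by
          rw [ih s hnd (fun y hy => hsub y (List.mem_cons_of_mem _ hy)),
              sum_map_indicator _ s hnd hx]
      _ = ((x :: t).countP p : Int) := by
          rw [List.countP_cons]
          by_cases hp : p x <;> simp [hp]

-- A computes: the number of elements of ranks whose successor occurs in ranks.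
theorem A_eq_countP (ranks : List Int) :
    solution ranks = (ranks.countP (fun r => decide ((r + 1) ∈ ranks)) : Int) := by
  unfold solution
  simp only [buildA_eq_counter]
  set p : Int → Bool := fun r => decide ((r + 1) ∈ ranks) with hp
  have hA : (PySem.Dict.counter ranks).keys.foldl (fun acc rank =>
      if ((PySem.Dict.counter ranks).get? (rank + 1)).getD 0 ≠ 0 then
        acc + (PySem.Dict.counter ranks).getD rank 0
      else acc) 0
      = ((PySem.Set.ofList ranks).map
          (fun u => if p u then (ranks.count u : Int) else 0)).sum := by
    rw [PySem.Dict.keys_counter]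
    induction (PySem.Set.ofList ranks) using List.reverseRecOn with
    | nil => simp
    | append_singleton s u ihs =>
      have hcond : (((PySem.Dict.counter ranks).get? (u + 1)).getD 0 ≠ 0)
          ↔ p u = true := by
        rw [← PySem.Dict.getD_eq_get?_getD, PySem.Dict.getD_counter, hp]
        simp [List.count_pos_iff.symm, Nat.pos_iff_ne_zero]
      rw [List.foldl_append, List.map_append, List.sum_append, ihs]
      by_cases hc : p u = true
      · simp [hc, hcond.mpr hc, PySem.Dict.getD_counter]
      · have : ¬ (((PySem.Dict.counter ranks).get? (u + 1)).getD 0 ≠ 0) :=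
          fun h => hc (hcond.mp h)
        simp only [List.foldl_cons, List.foldl_nil, List.map_cons, List.map_nil,
          List.sum_cons, List.sum_nil]
        rw [if_neg this, if_neg (by simpa using hc)]
        ring
  rw [hA]
  exact sum_counts_eq_countP p ranks (PySem.Set.ofList ranks)
    (PySem.Set.nodup_ofList ranks) (fun x hx => by simp [PySem.Set.mem_ofList, hx])

-- peeling the head off the successor-count when the head is minimal
theorem countP_cons_min (x : Int) (rest : List Int) (hmin : ∀ y ∈ rest, x ≤ y) :
    ((x :: rest).countP (fun z => decide ((z + 1) ∈ x :: rest)) : Int)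
      = (if x + 1 ∈ rest then 1 else 0)
        + (rest.countP (fun z => decide ((z + 1) ∈ rest)) : Int) := by
  have hcongr : rest.countP (fun z => decide ((z + 1) ∈ x :: rest))
      = rest.countP (fun z => decide ((z + 1) ∈ rest)) := by
    apply List.countP_congr
    intro z hz
    have hxz : x ≤ z := hmin z hz
    have : ((z + 1) ∈ x :: rest) ↔ ((z + 1) ∈ rest) := by
      constructor
      · intro h
        rcases List.mem_cons.mp h with h | h
        · omega
        · exact h
      · exact List.mem_cons_of_mem _
    simp [this]
  have hhead : ((x + 1) ∈ x :: rest) ↔ ((x + 1) ∈ rest) := by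
    constructor
    · intro h
      rcases List.mem_cons.mp h with h | h
      · omega
      · exact h
    · exact List.mem_cons_of_mem _
  rw [List.countP_cons, hcongr]
  by_cases h : (x + 1) ∈ rest
  · simp only [hcongr] at *
    simp [h, hhead.mpr h]
    omega
  · have : ¬ ((x + 1) ∈ x :: rest) := fun hc => h (hhead.mp hc)
    simp [h, this]

-- loop invariant for B's scan over a sorted suffix s, having just seen a run of p of length run
theorem scan_invariant :
    ∀ (s : List Int), s.Pairwise (· ≤ ·) →
      ∀ (t r p : Int), (∀ y ∈ s, p ≤ y) →
        (s.foldl bStep (t, r, some p)).1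
          = t + (if p + 1 ∈ s then r else 0)
              + (s.countP (fun z => decide ((z + 1) ∈ s)) : Int) := by
  intro s
  induction s with
  | nil => intro _ t r p _; simp
  | cons x rest ih =>
    intro hsorted t r p hmin
    have hxrest : ∀ y ∈ rest, x ≤ y := fun y hy => (List.pairwise_cons.mp hsorted).1 y hy
    have hrest : rest.Pairwise (· ≤ ·) := (List.pairwise_cons.mp hsorted).2
    have hpx : p ≤ x := hmin x List.mem_cons_self
    rw [countP_cons_min x rest hxrest]
    by_cases h1 : x = p
    · -- same value: run extends
      subst h1
      simp only [List.foldl_cons, bStep, ite_true]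
      rw [ih hrest t (r + 1) x hxrest]
      have hx1 : ((x + 1) ∈ x :: rest) ↔ ((x + 1) ∈ rest) := by
        constructor
        · intro h
          rcases List.mem_cons.mp h with h | h
          · omega
          · exact h
        · exact List.mem_cons_of_mem _
      by_cases h : (x + 1) ∈ rest
      · simp only [if_pos h, if_pos (hx1.mpr h)]
        ring
      · simp only [if_neg h, if_neg (fun hc => h (hx1.mp hc))]
        ring
    · have hplt : p < x := lt_of_le_of_ne hpx (fun e => h1 e.symm)
      by_cases h2 : x = p + 1
      · -- successor: previous run reports
        simp only [List.foldl_cons, bStep, if_neg h1, if_pos h2]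
        rw [ih hrest (t + r) 1 x hxrest]
        have : (p + 1) ∈ x :: rest := by rw [← h2]; exact List.mem_cons_self
        rw [if_pos this]
        by_cases h : (x + 1) ∈ rest
        · rw [if_pos h]; ring
        · rw [if_neg h]; ring
      · -- gap: previous run is dropped
        simp only [List.foldl_cons, bStep, if_neg h1, if_neg h2]
        rw [ih hrest t 1 x hxrest]
        have hnp : ¬ ((p + 1) ∈ x :: rest) := by
          intro hc
          rcases List.mem_cons.mp hc with h | h
          · exact h2 h.symm
          · have := hxrest _ h; omega
        rw [if_neg hnp]
        by_cases h : (x + 1) ∈ rest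
        · rw [if_pos h]; ring
        · rw [if_neg h]; ring

-- B computes the same successor count.
theorem B_eq_countP (ranks : List Int) :
    solution_alt ranks = (ranks.countP (fun r => decide ((r + 1) ∈ ranks)) : Int) := by
  unfold solution_alt
  have hperm : (PySem.List.sorted ranks (fun x => x) false).Perm ranks :=
    PySem.List.sorted_perm ranks (fun x => x) false
  have hcount : ((PySem.List.sorted ranks (fun x => x) false).countP
      (fun z => decide ((z + 1) ∈ PySem.List.sorted ranks (fun x => x) false)) : Int)
      = (ranks.countP (fun r => decide ((r + 1) ∈ ranks)) : Int) := by
    have h1 : (PySem.List.sorted ranks (fun x => x) false).countP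
        (fun z => decide ((z + 1) ∈ PySem.List.sorted ranks (fun x => x) false))
        = (PySem.List.sorted ranks (fun x => x) false).countP
            (fun z => decide ((z + 1) ∈ ranks)) := by
      apply List.countP_congr
      intro z _
      simp [PySem.List.mem_sorted]
    rw [h1, hperm.countP_eq]
  rcases hs : PySem.List.sorted ranks (fun x => x) false with _ | ⟨m, tl⟩
  · have : ranks = [] := (PySem.List.sorted_eq_nil_iff ranks (fun x => x) false).mp hs
    simp [this]
  · have hsorted : (m :: tl).Pairwise (fun a b => (a : Int) ≤ b) := by
      have := PySem.List.sorted_pairwise ranks (fun x => x) (κ := Int)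
      rwa [hs] at this
    have htl : ∀ y ∈ tl, m ≤ y := fun y hy => (List.pairwise_cons.mp hsorted).1 y hy
    simp only [List.foldl_cons, bStep]
    rw [scan_invariant tl (List.pairwise_cons.mp hsorted).2 0 1 m htl]
    rw [hs] at hcount
    rw [← hcount, countP_cons_min m tl htl]
    ring

-- ===== VERDICT (by name: the statement is the Claim_ definition above) =====
theorem solution_spec : Claim_equal_solution := by
  unfold Claim_equal_solution
  intro ranks _
  unfold Spec_solution
  rw [A_eq_countP, B_eq_countP]
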